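-- pv_equiv track=rewrite | github.com/shlim1392/Coding_p | Python/백준/Bronze/28453. Previous Level/Previous Level.py | solution
-- ===== SOURCE A (Python) =====
-- def solution(level_list):
--     pos = []
--     for x in level_list:
--         if x < 250:
--             pos.append(4)
--         elif x >= 250 and x < 275:
--             pos.append(3)
--         elif x >= 275 and x < 300:
--             pos.append(2)
--         else:
--             pos.append(1)
--     return " ".join(map(str, pos))
-- ===== SOURCE B (Python) =====
-- import bisect
--
-- BOUNDS = [250, 275, 300]
--
-- def solution(level_list):
--     return " ".join(str(4 - bisect.bisect_right(BOUNDS, x)) for x in level_list)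
-- ===== Notes on version B (the rewrite author's own statement) =====
-- stated objective: simpler
-- what changed: Replaces the four-way if/elif branch cascade with a sorted three-entry boundary table: bisect_right gives the range index i and the bucket is 4 - i, collected in one generator expression.
import Mathlib
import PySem

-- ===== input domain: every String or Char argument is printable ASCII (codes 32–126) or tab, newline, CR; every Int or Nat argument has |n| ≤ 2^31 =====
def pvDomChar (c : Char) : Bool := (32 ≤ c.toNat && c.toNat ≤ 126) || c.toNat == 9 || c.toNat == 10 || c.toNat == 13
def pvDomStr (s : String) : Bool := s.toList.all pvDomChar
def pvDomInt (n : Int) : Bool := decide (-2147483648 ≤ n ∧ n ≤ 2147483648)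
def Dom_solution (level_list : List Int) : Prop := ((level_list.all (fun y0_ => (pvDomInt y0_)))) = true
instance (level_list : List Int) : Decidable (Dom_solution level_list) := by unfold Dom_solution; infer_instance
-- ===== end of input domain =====

-- B replaces A's four-way if/elif cascade by a sorted boundary table and a
-- bisect_right index; objective: simpler.

-- ===== PORT A =====
-- literal transliteration of A's loop: pos starts empty, each branch appends
def solution (level_list : List Int) : String :=
  let pos : List Int := level_list.foldl (fun pos x =>
    if x < 250 then pos ++ [4]
    else if x ≥ 250 ∧ x < 275 then pos ++ [3]
    else if x ≥ 275 ∧ x < 300 then pos ++ [2]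
    else pos ++ [1]) []
  PySem.Str.join " " (pos.map PySem.Int.toStr)

-- ===== PORT B =====
-- bisect.bisect_right on a sorted list = number of elements ≤ x (its contract)
def pvBisectRight (bounds : List Int) (x : Int) : Int :=
  (bounds.countP (fun b => decide (b ≤ x)) : Int)

def pvBounds : List Int := [250, 275, 300]

def solution_alt (level_list : List Int) : String :=
  PySem.Str.join " "
    (level_list.map (fun x => PySem.Int.toStr (4 - pvBisectRight pvBounds x)))

-- ===== PRECONDITION & SPEC =====
def Spec_solution (level_list : List Int) (out : String) : Prop := out = solution_alt level_list
instance (level_list : List Int) (out : String) : Decidable (Spec_solution level_list out) := by unfold Spec_solution; infer_instance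

-- ===== CLAIM (what is proved, stated in full; the proofs are below) =====
def Claim_equal_solution : Prop := ∀ (level_list : List Int), Dom_solution level_list → Spec_solution level_list (solution level_list)

-- ===== LEMMAS AND PROOFS =====

-- per-element agreement of the branch cascade with the bisect formula
theorem pv_bucket_eq (x : Int) :
    (if x < 250 then (4:Int)
     else if x ≥ 250 ∧ x < 275 then 3
     else if x ≥ 275 ∧ x < 300 then 2
     else 1) = 4 - pvBisectRight pvBounds x := by
  simp only [pvBisectRight, pvBounds, List.countP_cons, List.countP_nil]
  split_ifs with h1 h2 h3 <;>
    simp_all <;> omega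

theorem pv_foldl_eq (xs : List Int) (acc : List Int) :
    xs.foldl (fun pos x =>
      if x < 250 then pos ++ [(4:Int)]
      else if x ≥ 250 ∧ x < 275 then pos ++ [3]
      else if x ≥ 275 ∧ x < 300 then pos ++ [2]
      else pos ++ [1]) acc
    = acc ++ xs.map (fun x => 4 - pvBisectRight pvBounds x) := by
  induction xs generalizing acc with
  | nil => simp
  | cons y ys ih =>
    simp only [List.foldl_cons, List.map_cons]
    rw [ih]
    have h := pv_bucket_eq y
    split_ifs at h ⊢ <;> simp [← h]

-- ===== VERDICT (by name: the statement is the Claim_ definition above) =====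
theorem solution_spec : Claim_equal_solution := by
  intro xs _
  unfold Spec_solution solution solution_alt
  rw [pv_foldl_eq]
  simp [List.map_map, Function.comp_def]
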